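-- pv_equiv track=rewrite | github.com/egorlavrentev08-droid/Buddy | config.py | get_exp_for_level
-- ===== SOURCE A (Python) =====
-- MAX_LEVEL = 100
--
-- def get_exp_for_level(level):
--     """Опыт для повышения уровня (минимум)"""
--     if level <= 1:
--         return 0
--     if level > MAX_LEVEL:
--         level = MAX_LEVEL
--     total = 0
--     for i in range(2, level + 1):
--         total += 100 + (i - 2) * 50
--     return total
-- ===== SOURCE B (Python) =====
-- MAX_LEVEL = 100
--
-- def get_exp_for_level(level):
--     """Опыт для повышения уровня (минимум)"""
--     if level <= 1:
--         return 0
--     n = min(level, MAX_LEVEL) - 1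
--     return 25 * n * n + 75 * n
-- ===== Notes on version B (the rewrite author's own statement) =====
-- stated objective: simpler
-- what changed: Replaced the explicit summation loop with the closed-form arithmetic-series formula in n = min(level, MAX_LEVEL) - 1.
import Mathlib
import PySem

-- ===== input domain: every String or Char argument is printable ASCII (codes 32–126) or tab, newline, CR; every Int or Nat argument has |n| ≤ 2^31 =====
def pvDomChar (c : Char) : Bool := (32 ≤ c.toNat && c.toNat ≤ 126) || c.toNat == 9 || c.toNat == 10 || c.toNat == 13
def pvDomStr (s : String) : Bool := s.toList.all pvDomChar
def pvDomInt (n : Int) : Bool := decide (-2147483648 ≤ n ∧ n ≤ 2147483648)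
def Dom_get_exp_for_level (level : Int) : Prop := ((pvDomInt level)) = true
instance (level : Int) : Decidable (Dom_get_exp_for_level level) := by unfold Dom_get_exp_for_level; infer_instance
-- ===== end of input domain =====

-- B replaces A's summation loop with the closed-form arithmetic-series formula in n = min(level, MAX_LEVEL) - 1; objective: simpler.


-- ===== PORT A =====
def get_exp_for_level (level : Int) : Int :=
  if level ≤ 1 then 0
  else
    let level := if level > 100 then 100 else level
    (PySem.List.pyRange 2 (level + 1) 1).foldl (fun total i => total + (100 + (i - 2) * 50)) 0

-- ===== PORT B =====
def get_exp_for_level_alt (level : Int) : Int :=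
  if level ≤ 1 then 0
  else
    let n := min level 100 - 1
    25 * n * n + 75 * n

-- ===== PRECONDITION & SPEC =====
def Spec_get_exp_for_level (level : Int) (out : Int) : Prop := out = get_exp_for_level_alt level
instance (level : Int) (out : Int) : Decidable (Spec_get_exp_for_level level out) := by unfold Spec_get_exp_for_level; infer_instance

-- ===== CLAIM (what is proved, stated in full; the proofs are below) =====
def Claim_equal_get_exp_for_level : Prop := ∀ (level : Int), Dom_get_exp_for_level level → Spec_get_exp_for_level level (get_exp_for_level level)

-- ===== LEMMAS AND PROOFS =====

-- A's loop over range(2, 2+n) sums to the closed form.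
theorem pv_loop_closed (n : Nat) (init : Int) :
    (PySem.List.pyRange 2 (2 + (n : Int)) 1).foldl (fun total i => total + (100 + (i - 2) * 50)) init
      = init + 25 * n * n + 75 * n := by
  induction n generalizing init with
  | zero => simp [PySem.List.pyRange_one_eq_nil]
  | succ m ih =>
    have h : (2 : Int) ≤ 2 + (m : Int) := by omega
    have : (2 : Int) + ((m + 1 : Nat) : Int) = (2 + (m : Int)) + 1 := by push_cast; ring
    rw [this, PySem.List.pyRange_one_succ_right h, List.foldl_append, ih]
    simp only [List.foldl_cons, List.foldl_nil]
    push_cast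
    ring

-- ===== VERDICT (by name: the statement is the Claim_ definition above) =====
theorem get_exp_for_level_spec : Claim_equal_get_exp_for_level := by
  intro level _
  unfold Spec_get_exp_for_level get_exp_for_level get_exp_for_level_alt
  by_cases h1 : level ≤ 1
  · simp [h1]
  · simp only [h1, if_false]
    set L : Int := if level > 100 then 100 else level with hL
    have hL2 : 2 ≤ L := by rw [hL]; split <;> omega
    have hLmin : L = min level 100 := by rw [hL]; by_cases h : level > 100 <;> simp [h] <;> omega
    obtain ⟨n, hn⟩ : ∃ n : Nat, L = 2 + (n : Int) := ⟨(L - 2).toNat, by omega⟩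
    have hr : L + 1 = 2 + ((n + 1 : Nat) : Int) := by push_cast; omega
    rw [hr, pv_loop_closed]
    have : min level 100 - 1 = (n : Int) + 1 := by omega
    rw [this]
    push_cast
    ring
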